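-- pv_equiv track=rewrite | github.com/linnil1/KIR_graph | kg_index_eval.py | selectKeyAlleleByResolution
-- ===== SOURCE A (Python) =====
-- def selectKeyAlleleByResolution(allele_names: list[str],
--                                 resolution: str = "gene") -> list[str]:
--     """
--     Select alleles and all selected allels is different under the resolution
--
--     Example:
--         allele_names:
--           - KIR2DL1*0010101
--           - KIR2DL1*00102
--           - KIR2DL1*00103
--           - KIR2DL1*00201
--           - KIR2DL1*0020201
--           - KIR2DL1*003
--         resolution: 3
--
--         Return:
--           - KIR2DL1*0010101
--           - KIR2DL1*00201
--           - KIR2DL1*003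
--     """
--     s = set()
--     reserved_name = []
--     for i in sorted(allele_names):
--         if resolution == "gene":
--             key = i.split("*")[0]
--         elif resolution == "7":
--             key = i.split("*")[0] + "*" + i.split("*")[1][:7]
--         elif resolution == "5":
--             key = i.split("*")[0] + "*" + i.split("*")[1][:5]
--         elif resolution == "5":
--             key = i.split("*")[0] + "*" + i.split("*")[1][:3]
--         else:
--             key = i
--         if key not in s:
--             s.add(key)
--             reserved_name.append(i)
--
--     return sorted(reserved_name)
-- ===== SOURCE B (Python) =====
-- def selectKeyAlleleByResolution(allele_names: list[str],
--                                 resolution: str = "gene") -> list[str]: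
--     """Deduplicate alleles by resolution-truncated key, keeping the smallest
--     name per key, without sorting the input up front."""
--     best: dict[str, str] = {}
--     for i in allele_names:
--         if resolution == "gene":
--             key = i.split("*")[0]
--         elif resolution == "7":
--             key = i.split("*")[0] + "*" + i.split("*")[1][:7]
--         elif resolution == "5":
--             key = i.split("*")[0] + "*" + i.split("*")[1][:5]
--         elif resolution == "5":
--             key = i.split("*")[0] + "*" + i.split("*")[1][:3]
--         else:
--             key = i
--         if key not in best or i < best[key]:
--             best[key] = i
--     return sorted(best.values())
-- ===== Notes on version B (the rewrite author's own statement) =====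
-- stated objective: alternative
-- what changed: B drops A's up-front sort of the whole input and its seen-keys set; instead it makes one pass over the original order keeping a dict from each resolution-truncated key to the running-minimum allele name, then sorts only the dict values.
import Mathlib
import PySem

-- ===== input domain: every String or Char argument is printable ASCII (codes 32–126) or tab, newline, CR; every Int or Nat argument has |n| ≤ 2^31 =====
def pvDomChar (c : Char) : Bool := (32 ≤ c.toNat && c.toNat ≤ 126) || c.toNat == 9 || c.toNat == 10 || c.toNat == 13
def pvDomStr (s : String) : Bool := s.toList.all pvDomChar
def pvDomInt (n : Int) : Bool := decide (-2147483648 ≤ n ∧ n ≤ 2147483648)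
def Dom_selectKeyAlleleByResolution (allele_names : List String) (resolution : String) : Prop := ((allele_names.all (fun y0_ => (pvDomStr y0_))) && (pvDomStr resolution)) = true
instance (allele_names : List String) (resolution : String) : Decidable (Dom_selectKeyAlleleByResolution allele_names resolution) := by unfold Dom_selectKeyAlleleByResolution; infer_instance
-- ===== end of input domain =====

-- B replaces A's sort-then-first-seen-per-key scan by an unsorted single pass keeping a
-- dict of the minimum name per resolution-truncated key, sorting only the kept values
-- (objective: alternative; proved to return the same list).


-- ===== PORT A =====
-- the if/elif key chain shared verbatim by both Python versions (including the dead
-- second "5" branch); i.split("*") is PySem.Chars.splitOn, [:n] is PySem.List.slice,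
-- [1] is pyGetD (safe under Pre_, which excludes the IndexError inputs)
def pvKey (resolution : String) (i : String) : String :=
  if resolution = "gene" then
    String.ofList (PySem.List.pyGetD (PySem.Chars.splitOn i.toList ['*']) 0 [])
  else if resolution = "7" then
    String.ofList (PySem.List.pyGetD (PySem.Chars.splitOn i.toList ['*']) 0 [] ++ ['*'] ++
      PySem.List.slice (PySem.List.pyGetD (PySem.Chars.splitOn i.toList ['*']) 1 []) none (some 7))
  else if resolution = "5" then
    String.ofList (PySem.List.pyGetD (PySem.Chars.splitOn i.toList ['*']) 0 [] ++ ['*'] ++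
      PySem.List.slice (PySem.List.pyGetD (PySem.Chars.splitOn i.toList ['*']) 1 []) none (some 5))
  else if resolution = "5" then
    String.ofList (PySem.List.pyGetD (PySem.Chars.splitOn i.toList ['*']) 0 [] ++ ['*'] ++
      PySem.List.slice (PySem.List.pyGetD (PySem.Chars.splitOn i.toList ['*']) 1 []) none (some 3))
  else i

def selectKeyAlleleByResolution (allele_names : List String) (resolution : String) : List String :=
  let st := (PySem.List.sorted allele_names (fun x => x)).foldl
    (fun st i =>
      if PySem.Set.contains st.1 (pvKey resolution i) then st
      else (PySem.Set.add st.1 (pvKey resolution i), st.2 ++ [i]))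
    ((PySem.Set.empty : PySem.Set String), ([] : List String))
  PySem.List.sorted st.2 (fun x => x)

-- ===== PORT B =====
-- the body of B's loop: keep the smaller name per key ('if key not in best or i < best[key]')
def pvStep (resolution : String) (d : PySem.Dict String String) (i : String) : PySem.Dict String String :=
  match d.get? (pvKey resolution i) with
  | none => d.insert (pvKey resolution i) i
  | some v => if i < v then d.insert (pvKey resolution i) i else d

def selectKeyAlleleByResolution_alt (allele_names : List String) (resolution : String) : List String :=
  let best := allele_names.foldl (pvStep resolution) PySem.Dict.empty
  PySem.List.sorted best.values (fun x => x)

-- ===== PRECONDITION & SPEC =====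
-- Pre_ excludes exactly the inputs where Python A raises IndexError: resolution "7" or "5"
-- with some allele name not containing "*" (i.split("*")[1] does not exist; B raises there too).
def Pre_selectKeyAlleleByResolution (allele_names : List String) (resolution : String) : Prop :=
  (resolution = "7" ∨ resolution = "5") → ∀ a ∈ allele_names, PySem.Str.isIn "*" a = true
instance (allele_names : List String) (resolution : String) : Decidable (Pre_selectKeyAlleleByResolution allele_names resolution) := by unfold Pre_selectKeyAlleleByResolution; infer_instance
def pvWitness_selectKeyAlleleByResolution : List String × String :=
  (["KIR2DL1*00103", "KIR2DL1*00101", "KIR2DL1*003"], "7")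
def Spec_selectKeyAlleleByResolution (allele_names : List String) (resolution : String) (out : List String) : Prop := out = selectKeyAlleleByResolution_alt allele_names resolution
instance (allele_names : List String) (resolution : String) (out : List String) : Decidable (Spec_selectKeyAlleleByResolution allele_names resolution out) := by unfold Spec_selectKeyAlleleByResolution; infer_instance

-- ===== CLAIM (what is proved, stated in full; the proofs are below) =====
def Claim_equal_selectKeyAlleleByResolution : Prop := ∀ (allele_names : List String) (resolution : String), Dom_selectKeyAlleleByResolution allele_names resolution → Pre_selectKeyAlleleByResolution allele_names resolution → Spec_selectKeyAlleleByResolution allele_names resolution (selectKeyAlleleByResolution allele_names resolution)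

-- ===== LEMMAS AND PROOFS =====

-- ---- A side: the kept sublist of the sorted scan ----
-- pvPick f s ys: the names A's loop appends when scanning ys with seen-set s
def pvPick (f : String → String) (s : PySem.Set String) : List String → List String
  | [] => []
  | i :: t => if PySem.Set.contains s (f i) then pvPick f s t
              else i :: pvPick f (PySem.Set.add s (f i)) t

theorem pvFoldA (f : String → String) :
    ∀ (ys : List String) (s : PySem.Set String) (r : List String),
    (ys.foldl (fun st i =>
        if PySem.Set.contains st.1 (f i) then st
        else (PySem.Set.add st.1 (f i), st.2 ++ [i])) (s, r)).2
      = r ++ pvPick f s ys := by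
  intro ys
  induction ys with
  | nil => intro s r; simp [pvPick]
  | cons i t ih =>
    intro s r
    simp only [List.foldl_cons, pvPick]
    by_cases h : PySem.Set.contains s (f i)
    · rw [if_pos h, if_pos h]
      exact ih s r
    · rw [if_neg h, if_neg h, ih, List.append_assoc]
      rfl

-- membership in pvPick over a sorted (Pairwise ≤) list: exactly the per-key minima
theorem pvPick_mem (f : String → String) :
    ∀ (ys : List String), ys.Pairwise (· ≤ ·) →
    ∀ (s : PySem.Set String) (x : String),
    (x ∈ pvPick f s ys ↔ (x ∈ ys ∧ f x ∉ s ∧ ∀ y ∈ ys, f y = f x → x ≤ y)) := by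
  intro ys
  induction ys with
  | nil => intro _ s x; simp [pvPick]
  | cons i t ih =>
    intro hp s x
    have hle : ∀ y ∈ t, i ≤ y := (List.pairwise_cons.mp hp).1
    have hpt : t.Pairwise (· ≤ ·) := (List.pairwise_cons.mp hp).2
    simp only [pvPick]
    by_cases h : PySem.Set.contains s (f i)
    · have hfi : f i ∈ s := (PySem.Set.contains_iff s (f i)).mp h
      rw [if_pos h, ih hpt s x]
      constructor
      · rintro ⟨hx, hfx, hmin⟩
        refine ⟨List.mem_cons_of_mem _ hx, hfx, ?_⟩
        intro y hy hfy
        rcases List.mem_cons.mp hy with rfl | hy'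
        · exact absurd (hfy ▸ hfi) hfx
        · exact hmin y hy' hfy
      · rintro ⟨hx, hfx, hmin⟩
        rcases List.mem_cons.mp hx with rfl | hx'
        · exact absurd hfi hfx
        · exact ⟨hx', hfx, fun y hy hfy => hmin y (List.mem_cons_of_mem _ hy) hfy⟩
    · have hfi : f i ∉ s := fun hm => h ((PySem.Set.contains_iff s (f i)).mpr hm)
      rw [if_neg h]
      simp only [List.mem_cons]
      constructor
      · rintro (rfl | hx)
        · refine ⟨Or.inl rfl, hfi, ?_⟩
          intro y hy hfy
          rcases hy with rfl | hy'
          · exact le_refl _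
          · exact hle y hy'
        · rcases (ih hpt _ x).mp hx with ⟨hxt, hfx, hmin⟩
          have hfx1 : f x ∉ s := fun hm => hfx ((PySem.Set.mem_add s (f i) (f x)).mpr (Or.inl hm))
          have hfx2 : f x ≠ f i := fun hm => hfx ((PySem.Set.mem_add s (f i) (f x)).mpr (Or.inr hm))
          refine ⟨Or.inr hxt, hfx1, ?_⟩
          intro y hy hfy
          rcases hy with rfl | hy'
          · exact absurd hfy.symm hfx2
          · exact hmin y hy' hfy
      · rintro ⟨hx, hfx, hmin⟩
        rcases hx with rfl | hxt
        · exact Or.inl rfl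
        · by_cases hxi : x = i
          · exact Or.inl hxi
          · refine Or.inr ((ih hpt _ x).mpr ⟨hxt, ?_, fun y hy hfy => hmin y (Or.inr hy) hfy⟩)
            intro hm
            rcases (PySem.Set.mem_add s (f i) (f x)).mp hm with hm' | hm'
            · exact hfx hm'
            · exact hxi (le_antisymm (hmin i (Or.inl rfl) hm'.symm) (hle x hxt))

-- every element of pvPick has a key outside the running set
theorem pvPick_key_not_mem (f : String → String) :
    ∀ (ys : List String) (s : PySem.Set String) (x : String),
    x ∈ pvPick f s ys → f x ∉ s := by
  intro ys
  induction ys with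
  | nil => intro s x hx; simp [pvPick] at hx
  | cons i t ih =>
    intro s x hx
    simp only [pvPick] at hx
    by_cases h : PySem.Set.contains s (f i)
    · rw [if_pos h] at hx
      exact ih s x hx
    · rw [if_neg h] at hx
      rcases List.mem_cons.mp hx with rfl | hx'
      · exact fun hm => h ((PySem.Set.contains_iff s (f x)).mpr hm)
      · intro hm
        exact ih _ x hx' ((PySem.Set.mem_add s (f i) (f x)).mpr (Or.inl hm))

-- pvPick holds at most one name per key, hence is Nodup
theorem pvPick_nodup (f : String → String) :
    ∀ (ys : List String) (s : PySem.Set String), (pvPick f s ys).Nodup := by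
  intro ys
  induction ys with
  | nil => intro s; simp [pvPick]
  | cons i t ih =>
    intro s
    simp only [pvPick]
    by_cases h : PySem.Set.contains s (f i)
    · rw [if_pos h]
      exact ih s
    · rw [if_neg h]
      refine List.nodup_cons.mpr ⟨fun hm => ?_, ih _⟩
      exact pvPick_key_not_mem f t _ i hm ((PySem.Set.mem_add s (f i) (f i)).mpr (Or.inr rfl))

-- ---- B side: the dict of per-key minima ----
theorem pvB_nodup_keys (res : String) :
    ∀ (ns : List String) (d : PySem.Dict String String), d.keys.Nodup →
    (ns.foldl (pvStep res) d).keys.Nodup := by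
  intro ns
  induction ns with
  | nil => intro d h; simpa using h
  | cons i t ih =>
    intro d h
    simp only [List.foldl_cons]
    apply ih
    unfold pvStep
    cases d.get? (pvKey res i) with
    | none => exact PySem.Dict.nodup_keys_insert d _ _ h
    | some v =>
      by_cases hlt : i < v
      · simpa [hlt] using PySem.Dict.nodup_keys_insert d (pvKey res i) i h
      · simpa [hlt] using h

-- every item of B's dict is (key of v, v) for its value v
theorem pvB_items_key (res : String) :
    ∀ (ns : List String) (d : PySem.Dict String String),
    (∀ p ∈ d.items, p.1 = pvKey res p.2) →
    ∀ p ∈ (ns.foldl (pvStep res) d).items, p.1 = pvKey res p.2 := by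
  intro ns
  induction ns with
  | nil => intro d h; simpa using h
  | cons i t ih =>
    intro d h
    simp only [List.foldl_cons]
    apply ih
    intro p hp
    unfold pvStep at hp
    cases hd : d.get? (pvKey res i) with
    | none =>
      rw [hd] at hp
      rcases (PySem.Dict.mem_items_insert d (pvKey res i) i p).mp hp with rfl | ⟨hp', _⟩
      · rfl
      · exact h p hp'
    | some v =>
      rw [hd] at hp
      have hp2 : p ∈ (if i < v then d.insert (pvKey res i) i else d).items := hp
      by_cases hlt : i < v
      · rw [if_pos hlt] at hp2
        rcases (PySem.Dict.mem_items_insert d (pvKey res i) i p).mp hp2 with rfl | ⟨hp', _⟩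
        · rfl
        · exact h p hp'
      · rw [if_neg hlt] at hp2
        exact h p hp2

-- the running-minimum step on an optional current best
def pvMin : Option String → String → Option String
  | none, i => some i
  | some v, i => if i < v then some i else some v

-- B's dict lookup at k is the running minimum of the names whose key is k
theorem pvB_get (res : String) :
    ∀ (ns : List String) (d : PySem.Dict String String) (k : String),
    (ns.foldl (pvStep res) d).get? k
      = (ns.filter (fun i => pvKey res i == k)).foldl pvMin (d.get? k) := by
  intro ns
  induction ns with
  | nil => intro d k; simp
  | cons i t ih =>
    intro d k
    simp only [List.foldl_cons, List.filter_cons]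
    by_cases hk : pvKey res i = k
    · simp only [hk, beq_self_eq_true, if_pos, List.foldl_cons]
      rw [ih]
      congr 1
      unfold pvStep pvMin
      cases hd : d.get? (pvKey res i) with
      | none =>
        have hd' : d.get? k = none := hk ▸ hd
        rw [hd', PySem.Dict.get?_insert, if_pos hk.symm]
      | some v =>
        have hd' : d.get? k = some v := hk ▸ hd
        rw [hd']
        by_cases hlt : i < v
        · simp only [if_pos hlt]
          rw [PySem.Dict.get?_insert, if_pos hk.symm]
        · simp only [if_neg hlt]
          exact hd'
    · have hkb : (pvKey res i == k) = false := beq_eq_false_iff_ne.mpr hk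
      rw [hkb, if_neg (by simp)]
      rw [ih]
      congr 1
      unfold pvStep
      cases hd : d.get? (pvKey res i) with
      | none => rw [PySem.Dict.get?_insert, if_neg (fun h => hk h.symm)]
      | some v =>
        by_cases hlt : i < v
        · simp only [if_pos hlt]
          rw [PySem.Dict.get?_insert, if_neg (fun h => hk h.symm)]
        · simp [hlt]

theorem pvMin_le (o : Option String) (i u : String) (h : pvMin o i = some u) :
    u ≤ i ∧ ∀ w, o = some w → u ≤ w := by
  cases o with
  | none =>
    simp only [pvMin, Option.some_inj] at h
    exact ⟨h ▸ le_refl _, by simp⟩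
  | some w =>
    simp only [pvMin] at h
    by_cases hlt : i < w
    · rw [if_pos hlt] at h
      cases h
      exact ⟨le_refl _, fun w' hw' => by cases hw'; exact le_of_lt hlt⟩
    · rw [if_neg hlt] at h
      cases h
      exact ⟨le_of_not_gt hlt, fun w' hw' => by cases hw'; exact le_refl _⟩

theorem pvMin_origin (o : Option String) (i u : String) (h : pvMin o i = some u) :
    u = i ∨ o = some u := by
  cases o with
  | none => simp only [pvMin, Option.some_inj] at h; exact Or.inl h.symm
  | some w =>
    simp only [pvMin] at h
    by_cases hlt : i < w
    · rw [if_pos hlt] at h; cases h; exact Or.inl rfl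
    · rw [if_neg hlt] at h; cases h; exact Or.inr rfl

theorem pvMin_foldl_gen :
    ∀ (l : List String) (o : Option String) (v : String),
    l.foldl pvMin o = some v →
    (v ∈ l ∨ o = some v) ∧ (∀ y ∈ l, v ≤ y) ∧ (∀ w, o = some w → v ≤ w) := by
  intro l
  induction l with
  | nil =>
    intro o v h
    simp only [List.foldl_nil] at h
    exact ⟨Or.inr h, by simp, fun w hw => by rw [h] at hw; cases hw; exact le_refl _⟩
  | cons i t ih =>
    intro o v h
    simp only [List.foldl_cons] at h
    obtain ⟨horig, hbound, hprev⟩ := ih (pvMin o i) v h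
    obtain ⟨u, hu⟩ : ∃ u, pvMin o i = some u := by
      cases o with
      | none => exact ⟨i, rfl⟩
      | some w =>
        by_cases hlt : i < w
        · exact ⟨i, by simp [pvMin, hlt]⟩
        · exact ⟨w, by simp [pvMin, hlt]⟩
    have hui := pvMin_le o i u hu
    have hvu : v ≤ u := hprev u hu
    have hvi : v ≤ i := le_trans hvu hui.1
    refine ⟨?_, ?_, ?_⟩
    · rcases horig with hv | hv
      · exact Or.inl (List.mem_cons_of_mem _ hv)
      · rw [hu] at hv
        cases hv
        rcases pvMin_origin o i v hu with rfl | ho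
        · exact Or.inl (List.mem_cons_self ..)
        · exact Or.inr ho
    · intro y hy
      rcases List.mem_cons.mp hy with rfl | hy'
      · exact hvi
      · exact hbound y hy'
    · intro w hw
      exact le_trans hvu (hui.2 w hw)

theorem pvMin_foldl_isSome :
    ∀ (l : List String) (o : Option String), o.isSome → (l.foldl pvMin o).isSome := by
  intro l
  induction l with
  | nil => intro o h; simpa using h
  | cons i t ih =>
    intro o h
    simp only [List.foldl_cons]
    apply ih
    cases o with
    | none => simp at h
    | some w => by_cases hlt : i < w <;> simp [pvMin, hlt]

-- the characterisation of B's kept values: v is kept iff v is a per-key minimum of ns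
theorem pvB_values_mem (res : String) (ns : List String) (v : String) :
    v ∈ (ns.foldl (pvStep res) PySem.Dict.empty).values
      ↔ (v ∈ ns ∧ ∀ y ∈ ns, pvKey res y = pvKey res v → v ≤ y) := by
  have hnd : (ns.foldl (pvStep res) PySem.Dict.empty).keys.Nodup :=
    pvB_nodup_keys res ns PySem.Dict.empty PySem.Dict.nodup_keys_empty
  constructor
  · intro hv
    obtain ⟨⟨k, w⟩, hp, hw⟩ := List.mem_map.mp hv
    have hw' : w = v := hw
    rw [hw'] at hp
    have hget : (ns.foldl (pvStep res) PySem.Dict.empty).get? k = some v :=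
      (PySem.Dict.get?_eq_some_iff_mem_items _ k v hnd).mpr hp
    rw [pvB_get res ns PySem.Dict.empty k] at hget
    simp only [PySem.Dict.get?_empty] at hget
    obtain ⟨horig, hbound, _⟩ := pvMin_foldl_gen _ none v hget
    have hvf : v ∈ ns.filter (fun i => pvKey res i == k) := by
      rcases horig with h | h
      · exact h
      · cases h
    have hvns : v ∈ ns := List.mem_of_mem_filter hvf
    have hvk : pvKey res v = k := by
      have := List.of_mem_filter hvf
      exact beq_iff_eq.mp this
    refine ⟨hvns, ?_⟩
    intro y hy hfy
    exact hbound y (List.mem_filter.mpr ⟨hy, beq_iff_eq.mpr (hvk ▸ hfy)⟩)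
  · rintro ⟨hvns, hmin⟩
    have hvf : v ∈ ns.filter (fun i => pvKey res i == pvKey res v) :=
      List.mem_filter.mpr ⟨hvns, beq_iff_eq.mpr rfl⟩
    have hsome : ((ns.filter (fun i => pvKey res i == pvKey res v)).foldl pvMin none).isSome := by
      cases hf : ns.filter (fun i => pvKey res i == pvKey res v) with
      | nil => rw [hf] at hvf; cases hvf
      | cons a t =>
        simp only [List.foldl_cons]
        exact pvMin_foldl_isSome t (pvMin none a) (by simp [pvMin])
    obtain ⟨w, hw⟩ := Option.isSome_iff_exists.mp hsome
    obtain ⟨horig, hbound, _⟩ := pvMin_foldl_gen _ none w hw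
    have hwf : w ∈ ns.filter (fun i => pvKey res i == pvKey res v) := by
      rcases horig with h | h
      · exact h
      · cases h
    have hwv : w = v := by
      obtain ⟨hwns, hwk0⟩ := List.mem_filter.mp hwf
      have hwk : pvKey res w = pvKey res v := beq_iff_eq.mp hwk0
      exact le_antisymm (hbound v hvf) (hmin w hwns hwk)
    have hget : (ns.foldl (pvStep res) PySem.Dict.empty).get? (pvKey res v) = some v := by
      rw [pvB_get res ns PySem.Dict.empty (pvKey res v)]
      simp only [PySem.Dict.get?_empty]
      rw [hw, hwv]
    exact List.mem_map.mpr ⟨(pvKey res v, v),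
      (PySem.Dict.get?_eq_some_iff_mem_items _ (pvKey res v) v hnd).mp hget, rfl⟩

-- B's kept values are Nodup (their keys are the dict's keys, which are Nodup)
theorem pvB_values_nodup (res : String) (ns : List String) :
    (ns.foldl (pvStep res) PySem.Dict.empty).values.Nodup := by
  have hnd : (ns.foldl (pvStep res) PySem.Dict.empty).keys.Nodup :=
    pvB_nodup_keys res ns PySem.Dict.empty PySem.Dict.nodup_keys_empty
  have hkey : ∀ p ∈ (ns.foldl (pvStep res) PySem.Dict.empty).items, p.1 = pvKey res p.2 :=
    pvB_items_key res ns PySem.Dict.empty (by simp [PySem.Dict.empty])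
  have hmap : ((ns.foldl (pvStep res) PySem.Dict.empty).values.map (pvKey res)).Nodup := by
    have : (ns.foldl (pvStep res) PySem.Dict.empty).values.map (pvKey res)
        = (ns.foldl (pvStep res) PySem.Dict.empty).keys := by
      show ((ns.foldl (pvStep res) PySem.Dict.empty).items.map (·.2)).map (pvKey res)
          = (ns.foldl (pvStep res) PySem.Dict.empty).items.map (·.1)
      rw [List.map_map]
      exact (List.map_congr_left (fun p hp => (hkey p hp).symm))
    rw [this]
    exact hnd
  exact hmap.of_map _

-- ===== VERDICT (by name: the statement is the Claim_ definition above) =====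
theorem selectKeyAlleleByResolution_spec : Claim_equal_selectKeyAlleleByResolution := by
  intro ns res _ _
  unfold Spec_selectKeyAlleleByResolution
  unfold selectKeyAlleleByResolution selectKeyAlleleByResolution_alt
  simp only []
  rw [pvFoldA (pvKey res) (PySem.List.sorted ns (fun x => x)) PySem.Set.empty []]
  simp only [List.nil_append]
  apply PySem.List.sorted_eq_sorted_of_perm _ _ _ (fun a b h => h)
  apply (List.perm_ext_iff_of_nodup (pvPick_nodup _ _ _) (pvB_values_nodup res ns)).mpr
  intro v
  rw [pvB_values_mem res ns v]
  rw [pvPick_mem (pvKey res) _ (by simpa using PySem.List.sorted_pairwise ns (fun x => x)) _ v]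
  constructor
  · rintro ⟨hv, _, hmin⟩
    exact ⟨(PySem.List.mem_sorted ns _ _ v).mp hv,
      fun y hy hfy => hmin y ((PySem.List.mem_sorted ns _ _ y).mpr hy) hfy⟩
  · rintro ⟨hv, hmin⟩
    refine ⟨(PySem.List.mem_sorted ns _ _ v).mpr hv, by simp [PySem.Set.empty], ?_⟩
    intro y hy hfy
    exact hmin y ((PySem.List.mem_sorted ns _ _ y).mp hy) hfy
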